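-- pv_equiv track=rewrite | github.com/pypi-data/pypi-mirror-201 | packages/htmlparsingbs4based/htmlparsingbs4based-0.0.2.tar.gz/htmlparsingbs4based-0.0.2/html_parsing/html_parsing_custombs4.py | find_useful_root
-- ===== SOURCE A (Python) =====
-- def find_useful_root(all_tag_info, level, i, r_tag):
--     while i > 0:
--         lst_tag = all_tag_info[i-1][0]
--         lst_level = all_tag_info[i-1][1]
--
--         if lst_level < level:
--             if lst_level == 0:
--                 return i - 1
--             else:
--                 if lst_tag in ['strong', 'em', 'b', 'i', 'u', 'sup', 'mark', 'del', 'ins', 'a', 'span']: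
--                     return find_useful_root(all_tag_info, lst_level, i-1, r_tag)
--                 else:
--                     return i - 1
--         else:
--             i = i - 1
-- ===== SOURCE B (Python) =====
-- INLINE_TAGS = frozenset(('strong', 'em', 'b', 'i', 'u', 'sup', 'mark', 'del', 'ins', 'a', 'span'))
--
-- def find_useful_root(all_tag_info, level, i, r_tag):
--     t = level
--     for j, (tag, lv) in zip(range(i - 1, -1, -1), reversed(all_tag_info[:i])):
--         if lv < t:
--             if lv == 0 or tag not in INLINE_TAGS:
--                 return j
--             t = lv
--     return None
-- ===== Notes on version B (the rewrite author's own statement) =====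
-- stated objective: simpler
-- what changed: Replaces A's while-loop with self-recursion by one flat scan of the reversed prefix all_tag_info[:i] zipped with its descending indices, keeping the threshold level as loop state; the recursion and index arithmetic disappear.
-- outside the precondition, e.g. on find_useful_root([], 0, 1, 'x'): A raises IndexError, B returns None
import Mathlib
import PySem

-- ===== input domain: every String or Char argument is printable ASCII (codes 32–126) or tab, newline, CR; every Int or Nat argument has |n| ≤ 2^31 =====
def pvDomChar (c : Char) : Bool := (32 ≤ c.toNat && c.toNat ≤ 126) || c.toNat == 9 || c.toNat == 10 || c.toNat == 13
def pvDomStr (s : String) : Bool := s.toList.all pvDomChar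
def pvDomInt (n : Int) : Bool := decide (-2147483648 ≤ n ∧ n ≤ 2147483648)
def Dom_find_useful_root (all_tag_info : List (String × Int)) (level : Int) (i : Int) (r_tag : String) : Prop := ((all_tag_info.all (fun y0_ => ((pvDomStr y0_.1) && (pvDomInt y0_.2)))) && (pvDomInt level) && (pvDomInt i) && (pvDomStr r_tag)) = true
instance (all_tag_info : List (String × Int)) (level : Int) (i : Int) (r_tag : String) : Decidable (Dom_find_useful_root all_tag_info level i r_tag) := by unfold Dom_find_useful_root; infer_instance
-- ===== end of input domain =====

-- B replaces A's while-loop-plus-tail-recursion by a single pass over the reversed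
-- prefix all_tag_info[:i] zipped with its indices (recursion → flat scan); objective: simpler.

-- ===== PORT A =====
-- literal transliteration of A: while i > 0 loop + tail recursion, fused into one
-- recursion on i (each loop iteration and each recursive call decreases i by 1).
def find_useful_root (all_tag_info : List (String × Int)) (level : Int) (i : Int) (r_tag : String) : Option Int :=
  if _h : 0 < i then
    match PySem.List.pyGet? all_tag_info (i - 1) with
    | none => none  -- IndexError in Python; excluded by Pre_
    | some (lst_tag, lst_level) =>
      if lst_level < level then
        if lst_level = 0 then some (i - 1)
        else
          if lst_tag ∈ ["strong", "em", "b", "i", "u", "sup", "mark", "del", "ins", "a", "span"] then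
            find_useful_root all_tag_info lst_level (i - 1) r_tag
          else some (i - 1)
      else find_useful_root all_tag_info level (i - 1) r_tag
  else none
termination_by i.toNat
decreasing_by all_goals omega

-- ===== PORT B =====
def pvInline : PySem.Set String :=
  PySem.Set.ofList ["strong", "em", "b", "i", "u", "sup", "mark", "del", "ins", "a", "span"]

def pvAltGo : List (Int × (String × Int)) → Int → Option Int
  | [], _ => none
  | (j, (tag, lv)) :: rest, t =>
    if lv < t then
      if lv = 0 ∨ tag ∉ pvInline then some j else pvAltGo rest lv
    else pvAltGo rest t

def find_useful_root_alt (all_tag_info : List (String × Int)) (level : Int) (i : Int) (r_tag : String) : Option Int :=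
  pvAltGo
    ((PySem.List.pyRange (i - 1) (-1) (-1)).zip
      (PySem.List.slice all_tag_info none (some i)).reverse)
    level

-- ===== PRECONDITION & SPEC =====
-- Pre_ excludes exactly i > len(all_tag_info), where A raises IndexError on its first access.
def Pre_find_useful_root (all_tag_info : List (String × Int)) (level : Int) (i : Int) (r_tag : String) : Prop :=
  i ≤ (all_tag_info.length : Int)
instance (all_tag_info : List (String × Int)) (level : Int) (i : Int) (r_tag : String) : Decidable (Pre_find_useful_root all_tag_info level i r_tag) := by unfold Pre_find_useful_root; infer_instance

def pvWitness_find_useful_root : (List (String × Int)) × Int × Int × String :=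
  ([("p", 0), ("em", 1)], 2, 2, "div")

def Spec_find_useful_root (all_tag_info : List (String × Int)) (level : Int) (i : Int) (r_tag : String) (out : Option Int) : Prop := out = find_useful_root_alt all_tag_info level i r_tag
instance (all_tag_info : List (String × Int)) (level : Int) (i : Int) (r_tag : String) (out : Option Int) : Decidable (Spec_find_useful_root all_tag_info level i r_tag out) := by unfold Spec_find_useful_root; infer_instance

-- ===== CLAIM (what is proved, stated in full; the proofs are below) =====
def Claim_equal_find_useful_root : Prop := ∀ (all_tag_info : List (String × Int)) (level : Int) (i : Int) (r_tag : String), Dom_find_useful_root all_tag_info level i r_tag → Pre_find_useful_root all_tag_info level i r_tag → Spec_find_useful_root all_tag_info level i r_tag (find_useful_root all_tag_info level i r_tag)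

-- ===== LEMMAS AND PROOFS =====

-- the zipped reversed-prefix list B scans, as a function of i
def pvZ (all_tag_info : List (String × Int)) (i : Int) : List (Int × (String × Int)) :=
  (PySem.List.pyRange (i - 1) (-1) (-1)).zip
    (PySem.List.slice all_tag_info none (some i)).reverse

lemma pvZ_nil (all_tag_info : List (String × Int)) (i : Int) (hi : i ≤ 0) :
    pvZ all_tag_info i = [] := by
  unfold pvZ
  rw [PySem.List.pyRange_neg_one_eq_nil (by omega)]
  simp

lemma pvZ_cons (all_tag_info : List (String × Int)) (i : Int) (hi : 0 < i)
    (hle : i ≤ (all_tag_info.length : Int)) :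
    pvZ all_tag_info i =
      (i - 1, all_tag_info.getD (i - 1).toNat ("", 0)) :: pvZ all_tag_info (i - 1) := by
  unfold pvZ
  rw [PySem.List.pyRange_neg_one_cons (by omega)]
  rw [PySem.List.slice_to _ (by omega : (0:Int) ≤ i),
      PySem.List.slice_to _ (by omega : (0:Int) ≤ i - 1)]
  have h2 : (i - 1).toNat < all_tag_info.length := by omega
  have h1 : List.take i.toNat all_tag_info =
      List.take (i - 1).toNat all_tag_info ++ [all_tag_info.getD (i - 1).toNat ("", 0)] := by
    rw [show i.toNat = (i - 1).toNat + 1 by omega, List.take_add_one,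
        List.getElem?_eq_getElem h2, List.getD_eq_getElem _ _ h2]
    rfl
  rw [h1, List.reverse_append]
  rfl

lemma pvGet_eq (all_tag_info : List (String × Int)) (i : Int) (hi : 0 < i)
    (hle : i ≤ (all_tag_info.length : Int)) :
    PySem.List.pyGet? all_tag_info (i - 1) =
      some (all_tag_info.getD (i - 1).toNat ("", 0)) := by
  have h2 : (i - 1).toNat < all_tag_info.length := by omega
  have hk : i - 1 = (((i - 1).toNat : Nat) : Int) := by omega
  rw [hk, PySem.List.pyGet?_natCast]
  simp [List.getElem?_eq_getElem (show i.toNat - 1 < all_tag_info.length by omega)]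

lemma pv_mem_inline (tag : String) :
    (tag ∈ pvInline) ↔
      tag ∈ ["strong", "em", "b", "i", "u", "sup", "mark", "del", "ins", "a", "span"] := by
  simp [pvInline, PySem.Set.mem_ofList]

lemma pv_main (all_tag_info : List (String × Int)) (r_tag : String) :
    ∀ (n : Nat) (level : Int), ((n : Int)) ≤ (all_tag_info.length : Int) →
      find_useful_root all_tag_info level (n : Int) r_tag =
        pvAltGo (pvZ all_tag_info (n : Int)) level := by
  intro n
  induction n with
  | zero =>
    intro level _
    rw [find_useful_root, pvZ_nil _ _ (by omega)]
    simp [pvAltGo]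
  | succ m ih =>
    intro level hle
    have hlt : (0 : Int) < ((m + 1 : Nat) : Int) := by positivity
    have hm : ((m + 1 : Nat) : Int) - 1 = ((m : Nat) : Int) := by omega
    rw [find_useful_root, dif_pos hlt,
        pvGet_eq _ _ hlt hle, pvZ_cons _ _ hlt hle, hm]
    set e := all_tag_info.getD ((m : Nat) : Int).toNat ("", 0) with he
    obtain ⟨tag, lv⟩ := e
    rw [pvAltGo]
    dsimp only
    by_cases h1 : lv < level
    · rw [if_pos h1, if_pos h1]
      by_cases h2 : lv = 0
      · rw [if_pos h2, if_pos (Or.inl h2)]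
      · by_cases h3 : tag ∈ ["strong", "em", "b", "i", "u", "sup", "mark", "del", "ins", "a", "span"]
        · rw [if_neg h2, if_pos h3,
              if_neg (by simp [pv_mem_inline, h2, h3]),
              ih lv (by omega)]
        · rw [if_neg h2, if_neg h3, if_pos (Or.inr (by rw [pv_mem_inline]; exact h3))]
    · rw [if_neg h1, if_neg h1, ih level (by omega)]

-- ===== VERDICT (by name: the statement is the Claim_ definition above) =====
theorem find_useful_root_spec : Claim_equal_find_useful_root := by
  intro all_tag_info level i r_tag _hdom hpre
  unfold Pre_find_useful_root at hpre
  unfold Spec_find_useful_root find_useful_root_alt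
  show find_useful_root all_tag_info level i r_tag = pvAltGo (pvZ all_tag_info i) level
  by_cases hi : i ≤ 0
  · rw [find_useful_root, dif_neg (by omega), pvZ_nil _ _ hi]
    rfl
  · have : i = ((i.toNat : Nat) : Int) := by omega
    rw [this]
    exact pv_main all_tag_info r_tag i.toNat level (by omega)
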